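-- pv_equiv track=rewrite | github.com/poiromaniax/ha-muxall | custom_components/muxall_bbq/coordinator.py | parse_kvps_from_ok_get
-- ===== SOURCE A (Python) =====
-- def parse_kvps_from_ok_get(message):
--     # Extract the part after 'OK: GET:'
--     try:
--         kvp_str = message.split('OK: GET:')[1].strip()
--     except IndexError:
--         return {}
--     # Split by commas, then by '='
--     kvps = {}
--     for pair in kvp_str.split(','):
--         if '=' in pair:
--             k, v = pair.split('=', 1)
--             kvps[k.strip()] = v.strip()
--     return kvps
-- ===== SOURCE B (Python) =====
-- def parse_kvps_from_ok_get(message):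
--     # Single left-to-right character scan instead of nested split()s.
--     parts = message.split('OK: GET:')
--     if len(parts) < 2:
--         return {}
--     kvps = {}
--     key, val, seen_eq = [], [], False
--     for c in parts[1].strip():
--         if c == ',':
--             if seen_eq:
--                 kvps[''.join(key).strip()] = ''.join(val).strip()
--             key, val, seen_eq = [], [], False
--         elif c == '=' and not seen_eq:
--             seen_eq = True
--         elif seen_eq:
--             val.append(c)
--         else:
--             key.append(c)
--     if seen_eq:
--         kvps[''.join(key).strip()] = ''.join(val).strip()
--     return kvps
-- ===== Notes on version B (the rewrite author's own statement) =====
-- stated objective: alternative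
-- what changed: Replaced the nested comma-split and equals-split passes over the payload by a single left-to-right character scan that accumulates key and value and flushes a dict entry at each separator.
import Mathlib
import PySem

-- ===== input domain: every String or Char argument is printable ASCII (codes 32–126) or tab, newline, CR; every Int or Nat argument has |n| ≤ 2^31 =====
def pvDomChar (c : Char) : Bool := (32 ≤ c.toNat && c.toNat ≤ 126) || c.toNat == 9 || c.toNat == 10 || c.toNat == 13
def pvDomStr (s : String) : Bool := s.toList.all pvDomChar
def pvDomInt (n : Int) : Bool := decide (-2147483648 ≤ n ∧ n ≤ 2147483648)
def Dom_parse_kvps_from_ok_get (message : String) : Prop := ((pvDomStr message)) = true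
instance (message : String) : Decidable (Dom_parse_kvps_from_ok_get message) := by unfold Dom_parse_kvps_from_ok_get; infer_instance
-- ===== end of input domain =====

-- B replaces A's nested comma/equals split passes by a single left-to-right
-- character scan (objective: alternative, same cost).

-- ===== PORT A =====
-- body of A's `for pair in kvp_str.split(',')` loop: `if '=' in pair: k, v = pair.split('=', 1); kvps[k.strip()] = v.strip()`
-- (the `| _ => d` arm is unreachable: split('=', 1) yields exactly two pieces when '=' is in pair)
def pvAstep (d : PySem.Dict (List Char) (List Char)) (pair : List Char) :
    PySem.Dict (List Char) (List Char) :=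
  if PySem.Chars.isIn ['='] pair then
    match PySem.Chars.splitOnMax pair ['='] 1 with
    | [k, v] => d.insert (PySem.Chars.strip k) (PySem.Chars.strip v)
    | _ => d
  else d

def parse_kvps_from_ok_get (message : String) : List (String × String) :=
  let parts := PySem.Chars.splitOn message.toList "OK: GET:".toList
  match PySem.List.pyGet? parts 1 with
  | none => []  -- except IndexError: return {}
  | some s =>
    let kvp_str := PySem.Chars.strip s
    let kvps := (PySem.Chars.splitOn kvp_str [',']).foldl pvAstep PySem.Dict.empty
    kvps.items.map (fun kv => (String.ofList kv.1, String.ofList kv.2))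

-- ===== PORT B =====
-- B's per-character step: state is (key, val, seen_eq, kvps)
def pvBstep (st : List Char × List Char × Bool × PySem.Dict (List Char) (List Char)) (c : Char) :
    List Char × List Char × Bool × PySem.Dict (List Char) (List Char) :=
  let (key, val, seenEq, d) := st
  if c = ',' then
    ([], [], false,
      if seenEq then d.insert (PySem.Chars.strip key) (PySem.Chars.strip val) else d)
  else if c = '=' ∧ seenEq = false then (key, val, true, d)
  else if seenEq then (key, val ++ [c], seenEq, d)
  else (key ++ [c], val, seenEq, d)

-- B's trailing `if seen_eq: kvps[...] = ...`
def pvBflush (st : List Char × List Char × Bool × PySem.Dict (List Char) (List Char)) :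
    PySem.Dict (List Char) (List Char) :=
  let (key, val, seenEq, d) := st
  if seenEq then d.insert (PySem.Chars.strip key) (PySem.Chars.strip val) else d

def parse_kvps_from_ok_get_alt (message : String) : List (String × String) :=
  match PySem.Chars.splitOn message.toList "OK: GET:".toList with
  | _ :: s :: _ =>
    let st := (PySem.Chars.strip s).foldl pvBstep ([], [], false, PySem.Dict.empty)
    (pvBflush st).items.map (fun kv => (String.ofList kv.1, String.ofList kv.2))
  | _ => []  -- len(parts) < 2

-- ===== PRECONDITION & SPEC =====
def Spec_parse_kvps_from_ok_get (message : String) (out : List (String × String)) : Prop := out = parse_kvps_from_ok_get_alt message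
instance (message : String) (out : List (String × String)) : Decidable (Spec_parse_kvps_from_ok_get message out) := by unfold Spec_parse_kvps_from_ok_get; infer_instance

-- ===== CLAIM (what is proved, stated in full; the proofs are below) =====
def Claim_equal_parse_kvps_from_ok_get : Prop := ∀ (message : String), Dom_parse_kvps_from_ok_get message → Spec_parse_kvps_from_ok_get message (parse_kvps_from_ok_get message)

-- ===== LEMMAS AND PROOFS =====

-- reference structural split on a single character (proved equal to PySem.Chars.splitOn s [a])
def pvSp (a : Char) : List Char → List (List Char)
  | [] => [[]]
  | c :: cs => if c = a then [] :: pvSp a cs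
               else match pvSp a cs with
                    | h :: t => (c :: h) :: t
                    | [] => [[c]]

lemma pvSp_ne_nil (a : Char) (s : List Char) : pvSp a s ≠ [] := by
  cases s with
  | nil => simp [pvSp]
  | cons c cs =>
    simp only [pvSp]
    split
    · simp
    · split <;> simp_all

lemma pvGo_spec (a : Char) :
    ∀ (l : List Char) (fuel : Nat) (cur : List Char) (acc : List (List Char)),
      l.length < fuel →
      PySem.Chars.splitOn.go [a] fuel l cur acc =
        acc.reverse ++
          (match pvSp a l with
           | h :: t => (cur.reverse ++ h) :: t
           | [] => [cur.reverse]) := by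
  intro l
  induction l with
  | nil =>
    intro fuel cur acc h
    cases fuel with
    | zero => omega
    | succ f => simp [PySem.Chars.splitOn.go, pvSp]
  | cons c rest ih =>
    intro fuel cur acc h
    cases fuel with
    | zero => simp at h
    | succ f =>
      by_cases hc : c = a
      · subst hc
        have hpre : List.isPrefixOf [c] (c :: rest) = true := by
          simp [List.isPrefixOf]
        rw [PySem.Chars.splitOn.go]
        simp only [hpre, if_true, List.length_cons, List.drop_succ_cons, List.length_nil, List.drop_zero]
        rw [ih f [] (cur.reverse :: acc) (by simpa using h)]
        have hne := pvSp_ne_nil c rest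
        cases hsp : pvSp c rest with
        | nil => exact absurd hsp hne
        | cons h0 t0 =>
          simp [pvSp, hsp]
      · have hpre : List.isPrefixOf [a] (c :: rest) = false := by
          simp [List.isPrefixOf]
          intro hh
          exact absurd hh.symm hc
        rw [PySem.Chars.splitOn.go]
        simp only [hpre, if_false, Bool.false_eq_true]
        rw [ih f (c :: cur) acc (by simp at h ⊢; omega)]
        have hne := pvSp_ne_nil a rest
        cases hsp : pvSp a rest with
        | nil => exact absurd hsp hne
        | cons h0 t0 =>
          simp [pvSp, hc, hsp]

lemma pvSplitOn_single (a : Char) (s : List Char) :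
    PySem.Chars.splitOn s [a] = pvSp a s := by
  unfold PySem.Chars.splitOn
  rw [pvGo_spec a s (s.length + 1) [] [] (by omega)]
  have hne := pvSp_ne_nil a s
  cases hsp : pvSp a s with
  | nil => exact absurd hsp hne
  | cons h t => simp

lemma pvSp_no_sep (a : Char) (s : List Char) (h : a ∉ s) : pvSp a s = [s] := by
  induction s with
  | nil => rfl
  | cons c cs ih =>
    simp only [List.mem_cons, not_or] at h
    simp only [pvSp]
    rw [if_neg (fun hh => h.1 hh.symm), ih h.2]

lemma pvSp_append_sep (a : Char) (pre rest : List Char) (h : a ∉ pre) :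
    pvSp a (pre ++ a :: rest) = pre :: pvSp a rest := by
  induction pre with
  | nil => simp [pvSp]
  | cons c cs ih =>
    simp only [List.mem_cons, not_or] at h
    simp only [List.cons_append, pvSp]
    rw [if_neg (fun hh => h.1 hh.symm), ih h.2]

lemma pvIsIn_single (a : Char) (s : List Char) :
    PySem.Chars.isIn [a] s = true ↔ a ∈ s := by
  rw [PySem.Chars.isIn_iff_infix]
  constructor
  · intro h
    exact h.mem (by simp)
  · intro h
    obtain ⟨l1, l2, rfl⟩ := List.append_of_mem h
    exact ⟨l1, l2, by simp⟩

-- split('=', 1) on key ++ '=' :: val with '=' ∉ key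
lemma pvGo1_spec :
    ∀ (key : List Char) (val : List Char) (fuel : Nat) (cur : List Char) (acc : List (List Char)),
      '=' ∉ key → (key ++ '=' :: val).length < fuel →
      PySem.Chars.splitOnMax.go ['='] fuel 1 (key ++ '=' :: val) cur acc =
        acc.reverse ++ [cur.reverse ++ key, val] := by
  intro key
  induction key with
  | nil =>
    intro val fuel cur acc _ h
    cases fuel with
    | zero => simp at h
    | succ f =>
      rw [PySem.Chars.splitOnMax.go.eq_def]
      have hpre : List.isPrefixOf ['='] ('=' :: val) = true := by simp [List.isPrefixOf]
      simp only [List.nil_append, hpre, if_true]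
      norm_num
      cases f with
      | zero => simp at h
      | succ f' =>
        cases val with
        | nil => simp [PySem.Chars.splitOnMax.go]
        | cons v vs => simp [PySem.Chars.splitOnMax.go]
  | cons c cs ih =>
    intro val fuel cur acc hk h
    simp only [List.mem_cons, not_or] at hk
    cases fuel with
    | zero => simp at h
    | succ f =>
      rw [PySem.Chars.splitOnMax.go.eq_def]
      have hpre : List.isPrefixOf ['='] (c :: (cs ++ '=' :: val)) = false := by
        simp only [List.isPrefixOf, Bool.and_eq_false_iff]
        left
        simpa [beq_iff_eq] using hk.1
      simp only [List.cons_append, hpre, if_false, Bool.false_eq_true]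
      norm_num
      rw [ih val f (c :: cur) acc hk.2 (by simp at h ⊢; omega)]
      simp

lemma pvSplitOnMax_eq (key val : List Char) (hk : '=' ∉ key) :
    PySem.Chars.splitOnMax (key ++ '=' :: val) ['='] 1 = [key, val] := by
  unfold PySem.Chars.splitOnMax
  rw [if_neg (by norm_num), show (1 : Int).toNat = 1 from rfl]
  rw [pvGo1_spec key val _ [] [] hk (by omega)]
  simp

-- pvAstep on the two segment shapes
lemma pvAstep_no_eq (d : PySem.Dict (List Char) (List Char)) (seg : List Char) (h : '=' ∉ seg) :
    pvAstep d seg = d := by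
  unfold pvAstep
  rw [if_neg]
  intro hc
  exact h ((pvIsIn_single '=' seg).mp hc)

lemma pvAstep_with_eq (d : PySem.Dict (List Char) (List Char)) (key val : List Char)
    (hk : '=' ∉ key) :
    pvAstep d (key ++ '=' :: val) =
      d.insert (PySem.Chars.strip key) (PySem.Chars.strip val) := by
  unfold pvAstep
  rw [if_pos ((pvIsIn_single '=' _).mpr (by simp))]
  rw [pvSplitOnMax_eq key val hk]

-- current in-progress segment of B's scanner
def pvSeg (key val : List Char) (seenEq : Bool) : List Char :=
  if seenEq then key ++ '=' :: val else key

-- the core invariant: B's scan over the rest of the characters equals A's fold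
-- over the comma-split of (current segment ++ rest)
lemma pvScan_eq :
    ∀ (cs key val : List Char) (seenEq : Bool) (d : PySem.Dict (List Char) (List Char)),
      ',' ∉ key → '=' ∉ key → ',' ∉ val → (seenEq = false → val = []) →
      pvBflush (cs.foldl pvBstep (key, val, seenEq, d)) =
        (pvSp ',' (pvSeg key val seenEq ++ cs)).foldl pvAstep d := by
  intro cs
  induction cs with
  | nil =>
    intro key val seenEq d hk1 hk2 hv1 hv2
    have hseg : ',' ∉ pvSeg key val seenEq := by
      cases seenEq <;> simp [pvSeg, hk1, hv1]
    rw [List.append_nil, pvSp_no_sep ',' _ hseg]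
    simp only [List.foldl_nil, List.foldl_cons]
    cases seenEq with
    | false => simp [pvSeg, pvBflush, pvAstep_no_eq d key hk2]
    | true => simp [pvSeg, pvBflush, pvAstep_with_eq d key val hk2]
  | cons c rest ih =>
    intro key val seenEq d hk1 hk2 hv1 hv2
    by_cases hc : c = ','
    · subst hc
      have hseg : ',' ∉ pvSeg key val seenEq := by
        cases seenEq <;> simp [pvSeg, hk1, hv1]
      have hstep : pvBstep (key, val, seenEq, d) ',' =
          ([], [], false,
            if seenEq then d.insert (PySem.Chars.strip key) (PySem.Chars.strip val) else d) := by
        simp [pvBstep]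
      have hsp : pvSp ',' (pvSeg key val seenEq ++ ',' :: rest) =
          pvSeg key val seenEq :: pvSp ',' rest := pvSp_append_sep ',' _ rest hseg
      rw [List.foldl_cons, hstep, hsp, List.foldl_cons]
      rw [ih [] [] false _ (by simp) (by simp) (by simp) (fun _ => rfl)]
      congr 1
      cases seenEq with
      | false => simp [pvSeg, pvAstep_no_eq d key hk2]
      | true => simp [pvSeg, pvAstep_with_eq d key val hk2]
    · rw [List.foldl_cons]
      by_cases he : c = '=' ∧ seenEq = false
      · obtain ⟨he1, he2⟩ := he
        subst he1; subst he2
        have hstep : pvBstep (key, val, false, d) '=' = (key, val, true, d) := by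
          simp [pvBstep]
        rw [hstep, ih key val true d hk1 hk2 hv1 (by simp)]
        rw [hv2 rfl]
        simp [pvSeg]
      · cases seenEq with
        | true =>
          have hstep : pvBstep (key, val, true, d) c = (key, val ++ [c], true, d) := by
            simp [pvBstep, hc]
          have hc' : ¬ (',' = c) := fun hh => hc hh.symm
          rw [hstep, ih key (val ++ [c]) true d hk1 hk2 (by simp [hv1, hc']) (by simp)]
          simp [pvSeg]
        | false =>
          have hce : c ≠ '=' := by
            intro hh
            exact he ⟨hh, rfl⟩
          have hstep : pvBstep (key, val, false, d) c = (key ++ [c], val, false, d) := by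
            simp [pvBstep, hc, hce]
          have hc' : ¬ (',' = c) := fun hh => hc hh.symm
          have hce' : ¬ ('=' = c) := fun hh => hce hh.symm
          rw [hstep, ih (key ++ [c]) val false d (by simp [hk1, hc']) (by simp [hk2, hce']) hv1 hv2]
          simp [pvSeg]

-- ===== VERDICT (by name: the statement is the Claim_ definition above) =====
theorem parse_kvps_from_ok_get_spec : Claim_equal_parse_kvps_from_ok_get := by
  intro message _
  unfold Spec_parse_kvps_from_ok_get parse_kvps_from_ok_get parse_kvps_from_ok_get_alt
  cases hp : PySem.Chars.splitOn message.toList "OK: GET:".toList with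
  | nil => simp [PySem.List.pyGet?, PySem.List.pyIdx?]
  | cons x t =>
    cases t with
    | nil => simp [PySem.List.pyGet?, PySem.List.pyIdx?]
    | cons s t' =>
      simp only [PySem.List.pyGet?, PySem.List.pyIdx?]
      norm_num
      congr 1
      rw [pvSplitOn_single ',' (PySem.Chars.strip s)]
      have := pvScan_eq (PySem.Chars.strip s) [] [] false PySem.Dict.empty
        (by simp) (by simp) (by simp) (fun _ => rfl)
      simp only [pvSeg, if_neg (by simp : ¬ (false = true)), List.nil_append] at this
      rw [this]
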